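-- pv_equiv track=rewrite | github.com/easton-chen/DART-exp | DART/DS.py | set_and
-- ===== SOURCE A (Python) =====
-- def set_and(alist):
--     res = 3
--     for a in alist:
--         if(a == 0):
--             res &= 1
--         elif(a == 1):
--             res &= 2
--         elif(a == 2):
--             res &= 3
--     return res
-- ===== SOURCE B (Python) =====
-- def set_and(alist):
--     has0 = 0 in alist
--     has1 = 1 in alist
--     return 3 & (1 if has0 else 3) & (2 if has1 else 3)
-- ===== Notes on version B (the rewrite author's own statement) =====
-- stated objective: simpler
-- what changed: Replaces the AND-accumulator loop by two membership tests (does 0 occur, does 1 occur) and derives the result directly from those presence flags.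
import Mathlib
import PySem

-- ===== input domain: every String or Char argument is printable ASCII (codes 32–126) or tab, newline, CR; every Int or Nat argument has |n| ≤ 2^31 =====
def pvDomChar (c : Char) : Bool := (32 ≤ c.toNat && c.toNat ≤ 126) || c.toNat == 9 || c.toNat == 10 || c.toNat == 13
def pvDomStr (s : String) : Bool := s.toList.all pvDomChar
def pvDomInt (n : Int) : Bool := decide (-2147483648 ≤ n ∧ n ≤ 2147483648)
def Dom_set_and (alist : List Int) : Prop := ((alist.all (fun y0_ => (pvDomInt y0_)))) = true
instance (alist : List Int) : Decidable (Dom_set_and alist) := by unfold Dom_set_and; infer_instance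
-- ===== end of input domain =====

-- B replaces A's AND-accumulator loop by two membership tests and a direct formula (objective: simpler).


-- ===== PORT A =====
def set_and_step (res : Int) (a : Int) : Int :=
  if a == 0 then PySem.Int.band res 1
  else if a == 1 then PySem.Int.band res 2
  else if a == 2 then PySem.Int.band res 3
  else res

def set_and (alist : List Int) : Int :=
  alist.foldl set_and_step 3

-- ===== PORT B =====
def set_and_alt (alist : List Int) : Int :=
  let has0 := alist.contains 0
  let has1 := alist.contains 1
  PySem.Int.band (PySem.Int.band 3 (if has0 then 1 else 3)) (if has1 then 2 else 3)

-- ===== PRECONDITION & SPEC =====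
def Spec_set_and (alist : List Int) (out : Int) : Prop := out = set_and_alt alist
instance (alist : List Int) (out : Int) : Decidable (Spec_set_and alist out) := by unfold Spec_set_and; infer_instance

-- ===== CLAIM (what is proved, stated in full; the proofs are below) =====
def Claim_equal_set_and : Prop := ∀ (alist : List Int), Dom_set_and alist → Spec_set_and alist (set_and alist)

-- ===== LEMMAS AND PROOFS =====
lemma set_and_fold (l : List Int) :
    ∀ r : Int, (r = 0 ∨ r = 1 ∨ r = 2 ∨ r = 3) →
      l.foldl set_and_step r =
        PySem.Int.band (PySem.Int.band r (if l.contains 0 then 1 else 3)) (if l.contains 1 then 2 else 3) := by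
  induction l with
  | nil =>
      rintro r (rfl | rfl | rfl | rfl) <;> decide
  | cons a t ih =>
      intro r hr
      have hstep : (set_and_step r a = 0 ∨ set_and_step r a = 1 ∨
          set_and_step r a = 2 ∨ set_and_step r a = 3) := by
        unfold set_and_step
        rcases hr with rfl | rfl | rfl | rfl <;> split_ifs <;> decide
      simp only [List.foldl_cons]
      rw [ih _ hstep]
      unfold set_and_step
      by_cases hc0 : (0:Int) ∈ t <;> by_cases hc1 : (1:Int) ∈ t <;>
        rcases hr with rfl | rfl | rfl | rfl <;>
          by_cases h0 : a = 0 <;> by_cases h1 : a = 1 <;> by_cases h2 : a = 2 <;>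
            simp [h0, h1, h2, hc0, hc1, show ((0:Int) = a) ↔ (a = 0) from eq_comm, show ((1:Int) = a) ↔ (a = 1) from eq_comm] <;> decide

-- ===== VERDICT (by name: the statement is the Claim_ definition above) =====
theorem set_and_spec : Claim_equal_set_and := by
  intro alist _
  unfold Spec_set_and set_and set_and_alt
  rw [set_and_fold alist 3 (by decide)]
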